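-- pv_equiv track=rewrite | github.com/kodsnack/advent_of_code_2019 | erikagnvall-python3/day03.py | _path2coords
-- ===== SOURCE A (Python) =====
-- def _path2coords(path):
--     coords = [(0, 0)]
--     for d, count in path:
--         x, y = coords[-1]
--         # fmt: off
--         if d == 'U':
--             coords.extend(
--                 zip([x] * count, range(y - 1, y - count - 1, -1))
--             )
--         elif d == 'R':
--             coords.extend(
--                 zip(range(x + 1, x + count + 1), [y] * count)
--             )
--         elif d == 'D':
--             coords.extend(
--                 zip([x] * count, range(y + 1, y + count + 1))
--             )
--         elif d == 'L':
--             coords.extend(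
--                 zip(range(x - 1, x - count - 1, -1), [y] * count)
--             )
--         # fmt: on
--     return coords
-- ===== SOURCE B (Python) =====
-- def _path2coords(path):
--     deltas = {'U': (0, -1), 'R': (1, 0), 'D': (0, 1), 'L': (-1, 0)}
--     coords = [(0, 0)]
--     x, y = 0, 0
--     for d, count in path:
--         step = deltas.get(d)
--         if step is None:
--             continue
--         dx, dy = step
--         for _ in range(count):
--             x += dx
--             y += dy
--             coords.append((x, y))
--     return coords
-- ===== Notes on version B (the rewrite author's own statement) =====
-- stated objective: idiomatic
-- what changed: Replaces A's four zip/range/replicate branch bodies and coords[-1] re-reading with a direction-to-delta table lookup, a tracked (x,y) cursor and a per-unit stepping loop.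
import Mathlib
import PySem

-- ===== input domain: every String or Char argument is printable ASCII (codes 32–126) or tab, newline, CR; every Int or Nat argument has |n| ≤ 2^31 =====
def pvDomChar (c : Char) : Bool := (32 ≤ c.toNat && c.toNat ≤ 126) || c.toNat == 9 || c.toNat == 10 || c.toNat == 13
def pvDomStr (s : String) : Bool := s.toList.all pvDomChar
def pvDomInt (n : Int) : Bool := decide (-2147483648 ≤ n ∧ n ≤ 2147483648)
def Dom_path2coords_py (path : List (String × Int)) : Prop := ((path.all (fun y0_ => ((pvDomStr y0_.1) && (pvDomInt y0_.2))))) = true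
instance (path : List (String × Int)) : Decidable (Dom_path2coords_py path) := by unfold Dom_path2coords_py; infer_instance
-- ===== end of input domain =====

-- B replaces A's four zip/range branches by a direction→delta table and a unit-stepping loop over a tracked cursor (idiomatic decomposition; same cost).

-- ===== PORT A =====
-- body of A's 'for d, count in path' loop
def pvAStep (coords : List (Int × Int)) (dc : String × Int) : List (Int × Int) :=
  let d := dc.1
  let count := dc.2
  -- x, y = coords[-1]; coords is never empty, so the total pyGetD form is exact here
  let xy := PySem.List.pyGetD coords (-1) (0, 0)
  let x := xy.1
  let y := xy.2
  if d = "U" then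
    coords ++ List.zip (PySem.List.pyRepeat [x] count) (PySem.List.pyRange (y - 1) (y - count - 1) (-1))
  else if d = "R" then
    coords ++ List.zip (PySem.List.pyRange (x + 1) (x + count + 1) 1) (PySem.List.pyRepeat [y] count)
  else if d = "D" then
    coords ++ List.zip (PySem.List.pyRepeat [x] count) (PySem.List.pyRange (y + 1) (y + count + 1) 1)
  else if d = "L" then
    coords ++ List.zip (PySem.List.pyRange (x - 1) (x - count - 1) (-1)) (PySem.List.pyRepeat [y] count)
  else coords

def path2coords_py (path : List (String × Int)) : List (Int × Int) :=
  path.foldl pvAStep [(0, 0)]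

-- ===== PORT B =====
def pvDeltas : PySem.Dict String (Int × Int) :=
  ((((PySem.Dict.empty).insert "U" (0, -1)).insert "R" (1, 0)).insert "D" (0, 1)).insert "L" (-1, 0)

-- the inner 'for _ in range(count)' loop of B; state = (coords, x, y)
def pvStep (dx dy : Int) (r : List Int) (st : List (Int × Int) × Int × Int) : List (Int × Int) × Int × Int :=
  r.foldl (fun s _ => (s.1 ++ [(s.2.1 + dx, s.2.2 + dy)], s.2.1 + dx, s.2.2 + dy)) st

-- body of B's outer loop
def pvBStep (st : List (Int × Int) × Int × Int) (dc : String × Int) : List (Int × Int) × Int × Int :=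
  match PySem.Dict.get? pvDeltas dc.1 with
  | none => st
  | some dxy => pvStep dxy.1 dxy.2 (PySem.List.pyRange 0 dc.2 1) st

def path2coords_py_alt (path : List (String × Int)) : List (Int × Int) :=
  (path.foldl pvBStep ([(0, 0)], 0, 0)).1

-- ===== PRECONDITION & SPEC =====
def Spec_path2coords_py (path : List (String × Int)) (out : List (Int × Int)) : Prop := out = path2coords_py_alt path
instance (path : List (String × Int)) (out : List (Int × Int)) : Decidable (Spec_path2coords_py path out) := by unfold Spec_path2coords_py; infer_instance

-- ===== CLAIM (what is proved, stated in full; the proofs are below) =====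
def Claim_equal_path2coords_py : Prop := ∀ (path : List (String × Int)), Dom_path2coords_py path → Spec_path2coords_py path (path2coords_py path)

-- ===== LEMMAS AND PROOFS =====

theorem zip_replicate_map (n : Nat) (x : Int) (g : Nat → Int) :
    List.zip (List.replicate n x) ((List.range n).map g) =
      (List.range n).map (fun k => (x, g k)) := by
  induction n generalizing g with
  | zero => simp
  | succ m ih =>
    simp only [List.range_succ_eq_map, List.replicate_succ, List.map_cons, List.zip_cons_cons,
      List.map_map]
    rw [ih]
    simp [Function.comp]

theorem zip_map_replicate (n : Nat) (y : Int) (g : Nat → Int) :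
    List.zip ((List.range n).map g) (List.replicate n y) =
      (List.range n).map (fun k => (g k, y)) := by
  induction n generalizing g with
  | zero => simp
  | succ m ih =>
    simp only [List.range_succ_eq_map, List.replicate_succ, List.map_cons, List.zip_cons_cons,
      List.map_map]
    rw [ih]
    simp [Function.comp]

theorem pvStep_eq (dx dy : Int) (l : List Int) (coords : List (Int × Int)) (x y : Int) :
    pvStep dx dy l (coords, x, y) =
      (coords ++ (List.range l.length).map (fun k : Nat => (x + dx * ((k : Int) + 1), y + dy * ((k : Int) + 1))),
       x + dx * l.length, y + dy * l.length) := by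
  induction l generalizing coords x y with
  | nil => simp [pvStep]
  | cons a t ih =>
    show pvStep dx dy t (coords ++ [(x + dx, y + dy)], x + dx, y + dy) = _
    rw [ih]
    simp only [List.length_cons, List.range_succ_eq_map, List.map_cons, List.map_map,
      List.append_assoc, List.singleton_append, Prod.mk.injEq, List.cons_eq_cons,
      List.append_cancel_left_eq]
    refine ⟨⟨by simp, ?_⟩, by push_cast; ring, by push_cast; ring⟩
    apply List.map_congr_left
    intro k _
    simp only [Function.comp_apply, Prod.mk.injEq]
    constructor <;> push_cast <;> ring

theorem canon_last (coords : List (Int × Int)) (x y dx dy : Int) (n : Nat)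
    (hlast : coords.getLast? = some (x, y)) :
    (coords ++ (List.range n).map (fun k : Nat => (x + dx * ((k : Int) + 1), y + dy * ((k : Int) + 1)))).getLast?
      = some (x + dx * n, y + dy * n) := by
  cases n with
  | zero => simpa using hlast
  | succ m =>
    rw [List.range_succ, List.map_append, ← List.append_assoc]
    simp only [List.map_cons, List.map_nil]
    rw [List.getLast?_concat]
    push_cast
    ring_nf

theorem canon_ne (coords : List (Int × Int)) (L : List (Int × Int)) (hne : coords ≠ []) :
    coords ++ L ≠ [] := by
  simp [List.append_eq_nil_iff, hne]

theorem pyGetD_last (coords : List (Int × Int)) (x y : Int) (h : coords ≠ [])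
    (hl : coords.getLast? = some (x, y)) :
    PySem.List.pyGetD coords (-1) ((0 : Int), (0 : Int)) = (x, y) := by
  rw [PySem.List.pyGetD_neg_one coords (0, 0) h]
  rw [List.getLast?_eq_some_getLast h] at hl
  exact Option.some.inj hl

theorem pvDeltas_none (d : String) (h1 : ¬ d = "U") (h2 : ¬ d = "R") (h3 : ¬ d = "D")
    (h4 : ¬ d = "L") : PySem.Dict.get? pvDeltas d = none := by
  simp only [pvDeltas, PySem.Dict.get?, PySem.Dict.insert, PySem.Dict.empty]
  simp
  exact ⟨fun h => h1 h.symm, fun h => h2 h.symm, fun h => h3 h.symm, fun h => h4 h.symm⟩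

-- one A-branch rewritten into the canonical (range n).map unit-step form, per direction
theorem astep_U (coords : List (Int × Int)) (x y count : Int) (h : coords ≠ [])
    (hl : coords.getLast? = some (x, y)) :
    pvAStep coords ("U", count) =
      coords ++ (List.range count.toNat).map
        (fun k : Nat => (x + 0 * ((k : Int) + 1), y + (-1) * ((k : Int) + 1))) := by
  simp only [pvAStep, pyGetD_last coords x y h hl, String.reduceEq, reduceIte]
  rw [PySem.List.pyRepeat_singleton, PySem.List.pyRange_neg_one]
  have h2 : y - 1 - (y - count - 1) = count := by ring
  rw [h2, zip_replicate_map]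
  congr 1
  apply List.map_congr_left
  intro k _
  simp only [Prod.mk.injEq]
  constructor <;> ring

theorem astep_R (coords : List (Int × Int)) (x y count : Int) (h : coords ≠ [])
    (hl : coords.getLast? = some (x, y)) :
    pvAStep coords ("R", count) =
      coords ++ (List.range count.toNat).map
        (fun k : Nat => (x + 1 * ((k : Int) + 1), y + 0 * ((k : Int) + 1))) := by
  simp only [pvAStep, pyGetD_last coords x y h hl, String.reduceEq, reduceIte]
  rw [PySem.List.pyRepeat_singleton, PySem.List.pyRange_one]
  have h2 : x + count + 1 - (x + 1) = count := by ring
  rw [h2, zip_map_replicate]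
  congr 1
  apply List.map_congr_left
  intro k _
  simp only [Prod.mk.injEq]
  constructor <;> ring

theorem astep_D (coords : List (Int × Int)) (x y count : Int) (h : coords ≠ [])
    (hl : coords.getLast? = some (x, y)) :
    pvAStep coords ("D", count) =
      coords ++ (List.range count.toNat).map
        (fun k : Nat => (x + 0 * ((k : Int) + 1), y + 1 * ((k : Int) + 1))) := by
  simp only [pvAStep, pyGetD_last coords x y h hl, String.reduceEq, reduceIte]
  rw [PySem.List.pyRepeat_singleton, PySem.List.pyRange_one]
  have h2 : y + count + 1 - (y + 1) = count := by ring
  rw [h2, zip_replicate_map]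
  congr 1
  apply List.map_congr_left
  intro k _
  simp only [Prod.mk.injEq]
  constructor <;> ring

theorem astep_L (coords : List (Int × Int)) (x y count : Int) (h : coords ≠ [])
    (hl : coords.getLast? = some (x, y)) :
    pvAStep coords ("L", count) =
      coords ++ (List.range count.toNat).map
        (fun k : Nat => (x + (-1) * ((k : Int) + 1), y + 0 * ((k : Int) + 1))) := by
  simp only [pvAStep, pyGetD_last coords x y h hl, String.reduceEq, reduceIte]
  rw [PySem.List.pyRepeat_singleton, PySem.List.pyRange_neg_one]
  have h2 : x - 1 - (x - count - 1) = count := by ring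
  rw [h2, zip_map_replicate]
  congr 1
  apply List.map_congr_left
  intro k _
  simp only [Prod.mk.injEq]
  constructor <;> ring

-- B's step for a known direction, in the same canonical form
theorem bstep_known (coords : List (Int × Int)) (x y count dx dy : Int) (d : String)
    (hd : PySem.Dict.get? pvDeltas d = some (dx, dy)) :
    pvBStep (coords, x, y) (d, count) =
      (coords ++ (List.range count.toNat).map
        (fun k : Nat => (x + dx * ((k : Int) + 1), y + dy * ((k : Int) + 1))),
       x + dx * count.toNat, y + dy * count.toNat) := by
  simp only [pvBStep, hd]
  rw [pvStep_eq]
  congr 2 <;> · rw [PySem.List.length_pyRange_one]; norm_num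

-- the loop invariant: A's coords equals B's coords, and B's (x,y) is A's coords[-1]
theorem main_loop (path : List (String × Int)) (coords : List (Int × Int)) (x y : Int)
    (hne : coords ≠ []) (hlast : coords.getLast? = some (x, y)) :
    path.foldl pvAStep coords = (path.foldl pvBStep (coords, x, y)).1 := by
  induction path generalizing coords x y with
  | nil => rfl
  | cons dc rest ih =>
    obtain ⟨d, count⟩ := dc
    simp only [List.foldl_cons]
    by_cases hU : d = "U"
    · subst hU
      rw [astep_U coords x y count hne hlast, bstep_known coords x y count 0 (-1) "U" rfl]
      exact ih _ _ _ (canon_ne _ _ hne) (canon_last _ _ _ _ _ _ hlast)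
    by_cases hR : d = "R"
    · subst hR
      rw [astep_R coords x y count hne hlast, bstep_known coords x y count 1 0 "R" rfl]
      exact ih _ _ _ (canon_ne _ _ hne) (canon_last _ _ _ _ _ _ hlast)
    by_cases hD : d = "D"
    · subst hD
      rw [astep_D coords x y count hne hlast, bstep_known coords x y count 0 1 "D" rfl]
      exact ih _ _ _ (canon_ne _ _ hne) (canon_last _ _ _ _ _ _ hlast)
    by_cases hL : d = "L"
    · subst hL
      rw [astep_L coords x y count hne hlast, bstep_known coords x y count (-1) 0 "L" rfl]
      exact ih _ _ _ (canon_ne _ _ hne) (canon_last _ _ _ _ _ _ hlast)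
    · have hA : pvAStep coords (d, count) = coords := by
        simp only [pvAStep, if_neg hU, if_neg hR, if_neg hD, if_neg hL]
      have hB : pvBStep (coords, x, y) (d, count) = (coords, x, y) := by
        simp only [pvBStep, pvDeltas_none d hU hR hD hL]
      rw [hA, hB]
      exact ih _ _ _ hne hlast

-- ===== VERDICT (by name: the statement is the Claim_ definition above) =====
theorem path2coords_py_spec : Claim_equal_path2coords_py := by
  intro path _
  show path2coords_py path = path2coords_py_alt path
  exact main_loop path [(0, 0)] 0 0 (by simp) rfl
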